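-- pv_equiv track=rewrite | github.com/Stanis96/gpb_tasks | task_5.py | find_concatenated_words
-- ===== SOURCE A (Python) =====
-- def find_concatenated_words(word: str, word_list: list[str]) -> list[str]:
--     result = list()
--     for w in word_list:
--         if w != word:
--             min_len = min(len(word), len(w))
--             for i in range(min_len, 0, -1):
--                 if word.endswith(w[:i]):
--                     result.append(word + w[i:])
--                     break
--     return result
-- ===== SOURCE B (Python) =====
-- def find_concatenated_words(word: str, word_list: list[str]) -> list[str]:
--     n = len(word)
--     # only suffixes of word no longer than the longest list entry can ever match
--     cap = min(n, max(map(len, word_list), default=0))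
--     suffixes = {word[n - i:] for i in range(1, cap + 1)}
--     result = []
--     for w in word_list:
--         if w == word:
--             continue
--         best = 0
--         for i in range(1, min(n, len(w)) + 1):
--             if w[:i] in suffixes:
--                 best = i
--         if best != 0:
--             result.append(word + w[best:])
--     return result
-- ===== Notes on version B (the rewrite author's own statement) =====
-- stated objective: alternative
-- what changed: B precomputes, once, the set of word's suffixes no longer than the longest list entry and, for each entry, takes the maximum prefix length found by an ascending membership scan, instead of A's per-entry descending endswith scan with early break.
import Mathlib
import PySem

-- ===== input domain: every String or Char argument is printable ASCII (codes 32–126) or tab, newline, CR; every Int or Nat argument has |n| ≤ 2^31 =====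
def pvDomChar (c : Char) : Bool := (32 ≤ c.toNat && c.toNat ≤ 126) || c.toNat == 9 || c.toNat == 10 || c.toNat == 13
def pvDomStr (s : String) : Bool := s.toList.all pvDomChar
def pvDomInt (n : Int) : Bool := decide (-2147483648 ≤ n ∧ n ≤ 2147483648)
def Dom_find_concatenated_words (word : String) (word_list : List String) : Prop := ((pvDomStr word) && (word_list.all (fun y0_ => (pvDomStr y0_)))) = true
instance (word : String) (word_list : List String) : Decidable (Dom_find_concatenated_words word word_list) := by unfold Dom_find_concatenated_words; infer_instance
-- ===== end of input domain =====

-- B replaces A's per-entry descending endswith scan (first hit, break) by a set of word's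
-- suffixes (capped at the longest list entry) built once, plus an ascending maximum scan.

-- ===== PORT A =====
-- inner 'for i in range(min_len, 0, -1): if word.endswith(w[:i]): result.append(word + w[i:]); break'
-- returns the appended element (if any)
def pvAInner (word w : List Char) : List Int → Option (List Char)
  | [] => none
  | i :: rest =>
    if PySem.Chars.endswith word (PySem.Chars.slice w none (some i)) then
      some (word ++ PySem.Chars.slice w (some i) none)
    else pvAInner word w rest

def find_concatenated_words (word : String) (word_list : List String) : List String :=
  word_list.foldl (fun result w =>
    if w ≠ word then
      match pvAInner word.toList w.toList
          (PySem.List.pyRange (min (PySem.Str.len word) (PySem.Str.len w)) 0 (-1)) with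
      | some s => result ++ [String.ofList s]
      | none => result
    else result) []

-- ===== PORT B =====
-- 'best = 0; for i in range(1, min(n, len(w)) + 1): if w[:i] in suffixes: best = i'
def pvBBest (w : List Char) (sufs : PySem.Set (List Char)) (rng : List Int) : Int :=
  rng.foldl (fun best i =>
    if PySem.Set.contains sufs (PySem.Chars.slice w none (some i)) then i else best) 0

def find_concatenated_words_alt (word : String) (word_list : List String) : List String :=
  let n := PySem.Str.len word
  let cap := min n (PySem.List.maxD (word_list.map PySem.Str.len) (fun x => x) 0)
  let sufs : PySem.Set (List Char) :=
    PySem.Set.ofList ((PySem.List.pyRange 1 (cap + 1) 1).map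
      (fun i => PySem.Chars.slice word.toList (some (n - i)) none))
  word_list.foldl (fun result w =>
    if w == word then result
    else
      let best := pvBBest w.toList sufs (PySem.List.pyRange 1 (min n (PySem.Str.len w) + 1) 1)
      if best ≠ 0 then
        result ++ [String.ofList (word.toList ++ PySem.Chars.slice w.toList (some best) none)]
      else result) []

-- ===== PRECONDITION & SPEC =====
def Spec_find_concatenated_words (word : String) (word_list : List String) (out : List String) : Prop := out = find_concatenated_words_alt word word_list
instance (word : String) (word_list : List String) (out : List String) : Decidable (Spec_find_concatenated_words word word_list out) := by unfold Spec_find_concatenated_words; infer_instance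

-- ===== CLAIM (what is proved, stated in full; the proofs are below) =====
def Claim_equal_find_concatenated_words : Prop := ∀ (word : String) (word_list : List String), Dom_find_concatenated_words word word_list → Spec_find_concatenated_words word word_list (find_concatenated_words word word_list)

-- ===== LEMMAS AND PROOFS =====

-- the common spec of both inner scans: the largest i ∈ [1..m] with P i, scanning downward
def pvDescFirst? (P : Nat → Bool) : Nat → Option Nat
  | 0 => none
  | (m+1) => if P (m+1) then some (m+1) else pvDescFirst? P m

theorem pvDescFirst?_mem {P : Nat → Bool} {m i : Nat}
    (h : pvDescFirst? P m = some i) : 1 ≤ i ∧ i ≤ m := by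
  induction m with
  | zero => simp [pvDescFirst?] at h
  | succ k ih =>
    unfold pvDescFirst? at h
    split at h
    · cases h; omega
    · have := ih h; omega

theorem pvRange_desc (m : Nat) :
    PySem.List.pyRange ((m : Int) + 1) 0 (-1) = ((m : Int) + 1) :: PySem.List.pyRange (m : Int) 0 (-1) := by
  simp only [PySem.List.pyRange]
  norm_num
  rw [List.range_succ_eq_map, List.map_cons, List.map_map]
  congr 1
  have hif : (if 0 < m then m else 0) = m := by split <;> omega
  rw [hif]
  apply List.map_congr_left
  intro k _
  simp only [Function.comp]
  push_cast
  ring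

-- A's inner loop computes pvDescFirst? of the endswith test
theorem pvAInner_eq (word w : List Char) (m : Nat) :
    pvAInner word w (PySem.List.pyRange (m : Int) 0 (-1)) =
      (pvDescFirst? (fun i => PySem.Chars.endswith word (w.take i)) m).map
        (fun i => word ++ w.drop i) := by
  induction m with
  | zero => simp [PySem.List.pyRange, pvDescFirst?, pvAInner]
  | succ k ih =>
    have : ((k + 1 : Nat) : Int) = (k : Int) + 1 := by push_cast; ring
    rw [this, pvRange_desc]
    unfold pvAInner
    rw [← this]
    simp only [PySem.Chars.slice_eq_listSlice, PySem.List.slice_to_natCast,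
      PySem.List.slice_from_natCast]
    unfold pvDescFirst?
    split
    · rfl
    · rw [ih]

-- B's ascending maximum scan computes the same pvDescFirst? (as an Int, default 0)
theorem pvBBest_eq (word w : List Char) (sufs : PySem.Set (List Char)) (m : Nat)
    (hC : ∀ i : Nat, 1 ≤ i → i ≤ m →
      (PySem.Set.contains sufs (w.take i) = PySem.Chars.endswith word (w.take i))) :
    pvBBest w sufs (PySem.List.pyRange 1 ((m : Int) + 1) 1) =
      ((pvDescFirst? (fun i => PySem.Chars.endswith word (w.take i)) m).map
        (fun i : Nat => (i : Int))).getD 0 := by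
  induction m with
  | zero => simp [pvBBest, PySem.List.pyRange, pvDescFirst?]
  | succ k ih =>
    have hcast : ((k + 1 : Nat) : Int) = (k : Int) + 1 := by push_cast; ring
    have hsplit : PySem.List.pyRange 1 ((k : Int) + 1 + 1) 1 =
        PySem.List.pyRange 1 ((k : Int) + 1) 1 ++ [(k : Int) + 1] := by
      exact PySem.List.pyRange_one_succ_right (by omega)
    rw [hcast, hsplit]
    unfold pvBBest
    rw [List.foldl_append]
    have hlast : PySem.Chars.slice w none (some ((k : Int) + 1)) = w.take (k + 1) := by
      rw [← hcast]
      simp only [PySem.Chars.slice_eq_listSlice, PySem.List.slice_to_natCast]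
    simp only [List.foldl_cons, List.foldl_nil, hlast]
    rw [hC (k + 1) (by omega) (le_refl _)]
    have ihh := ih (fun i h1 h2 => hC i h1 (by omega))
    unfold pvBBest at ihh
    unfold pvDescFirst?
    rcases hE : PySem.Chars.endswith word (w.take (k + 1)) with _ | _
    · simp only [Bool.false_eq_true, if_false]
      rw [ihh]
    · simp only [if_true]
      simp [hcast]

-- membership of w.take i in the (capped) suffix set is A's endswith test
theorem pvContains_iff (word w : List Char) (cap i : Nat) (h1 : 1 ≤ i) (h3 : i ≤ w.length)
    (hcap : i ≤ cap) (hcapn : cap ≤ word.length) :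
    PySem.Set.contains
      (PySem.Set.ofList ((PySem.List.pyRange 1 ((cap : Int) + 1) 1).map
        (fun i' => PySem.Chars.slice word (some ((word.length : Int) - i')) none)) : PySem.Set (List Char))
      (w.take i) = PySem.Chars.endswith word (w.take i) := by
  have h2 : i ≤ word.length := le_trans hcap hcapn
  rw [Bool.eq_iff_iff, PySem.Set.contains_iff, PySem.Set.mem_ofList]
  constructor
  · intro hmem
    rw [List.mem_map] at hmem
    obtain ⟨i', hi', hdrop⟩ := hmem
    rw [PySem.List.mem_pyRange_one] at hi'
    have hle : (0 : Int) ≤ (word.length : Int) - i' := by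
      have : (i' : Int) ≤ (cap : Int) := by omega
      have : (cap : Int) ≤ (word.length : Int) := by exact_mod_cast hcapn
      omega
    rw [PySem.Chars.slice_eq_listSlice, PySem.List.slice_from _ hle] at hdrop
    rw [PySem.Chars.endswith_iff, ← hdrop]
    exact List.drop_suffix _ _
  · intro hend
    rw [PySem.Chars.endswith_iff] at hend
    have hlen : (w.take i).length = i := by rw [List.length_take]; omega
    have hdrop : w.take i = word.drop (word.length - i) := by
      rw [List.suffix_iff_eq_drop] at hend
      rw [hend, hlen]
    rw [List.mem_map]
    refine ⟨((i : Nat) : Int), ?_, ?_⟩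
    · rw [PySem.List.mem_pyRange_one]
      constructor
      · exact_mod_cast h1
      · have : (i : Int) ≤ (cap : Int) := by exact_mod_cast hcap
        omega
    · have hc : (word.length : Int) - (i : Nat) = ((word.length - i : Nat) : Int) := by
        omega
      rw [hc, PySem.Chars.slice_eq_listSlice, PySem.List.slice_from_natCast, ← hdrop]

-- per-element agreement of the two outer loop bodies (M bounds every entry's length)
theorem pvStep_eq (word : String) (M : Int) (hM0 : 0 ≤ M) (w : String)
    (hwM : ((w.toList.length : Nat) : Int) ≤ M) (result : List String) :
    (if w ≠ word then
      match pvAInner word.toList w.toList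
          (PySem.List.pyRange (min (PySem.Str.len word) (PySem.Str.len w)) 0 (-1)) with
      | some s => result ++ [String.ofList s]
      | none => result
    else result) =
    (if w == word then result
     else
      let best := pvBBest w.toList
        (PySem.Set.ofList ((PySem.List.pyRange 1 (min (PySem.Str.len word) M + 1) 1).map
          (fun i => PySem.Chars.slice word.toList (some (PySem.Str.len word - i)) none)))
        (PySem.List.pyRange 1 (min (PySem.Str.len word) (PySem.Str.len w) + 1) 1)
      if best ≠ 0 then
        result ++ [String.ofList (word.toList ++ PySem.Chars.slice w.toList (some best) none)]
      else result) := by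
  by_cases hw : w = word
  · simp [hw]
  · have hne : (w == word) = false := by
      simp [hw]
    rw [if_pos hw]
    simp only [hne, Bool.false_eq_true, if_false]
    set m : Nat := min word.toList.length w.toList.length with hm
    set cap : Nat := min word.toList.length M.toNat with hcapdef
    have hmin : min (PySem.Str.len word) (PySem.Str.len w) = (m : Int) := by
      simp only [PySem.Str.len_eq, hm]
      push_cast
      omega
    have hcapI : min (PySem.Str.len word) M = (cap : Int) := by
      simp only [PySem.Str.len_eq, hcapdef]
      push_cast
      omega
    have hlenn : (PySem.Str.len word : Int) = (word.toList.length : Int) := by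
      simp [PySem.Str.len_eq]
    rw [hmin, hcapI, pvAInner_eq]
    have hCB := pvBBest_eq word.toList w.toList
      (PySem.Set.ofList ((PySem.List.pyRange 1 ((cap : Int) + 1) 1).map
        (fun i => PySem.Chars.slice word.toList (some ((word.toList.length : Int) - i)) none))) m
      (fun i h1 h2 => pvContains_iff word.toList w.toList cap i h1 (by omega)
        (by omega) (by omega))
    rw [show (fun i => PySem.Chars.slice word.toList (some (PySem.Str.len word - i)) none) =
        (fun i => PySem.Chars.slice word.toList (some ((word.toList.length : Int) - i)) none) from by
      funext i; rw [hlenn]]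
    rw [hCB]
    cases hD : pvDescFirst? (fun i => PySem.Chars.endswith word.toList (w.toList.take i)) m with
    | none => simp
    | some i =>
      have hi := pvDescFirst?_mem hD
      simp only [Option.map_some, Option.getD_some]
      have hiz : ((i : Int) ≠ 0) := by omega
      rw [if_pos hiz]
      rw [PySem.Chars.slice_eq_listSlice, PySem.List.slice_from_natCast]

-- ===== VERDICT (by name: the statement is the Claim_ definition above) =====
theorem find_concatenated_words_spec : Claim_equal_find_concatenated_words := by
  intro word word_list _
  unfold Spec_find_concatenated_words find_concatenated_words find_concatenated_words_alt
  have hM0 : (0 : Int) ≤ PySem.List.maxD (word_list.map PySem.Str.len) (fun x => x) 0 := by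
    unfold PySem.List.maxD
    cases hmx : PySem.List.max? (word_list.map PySem.Str.len) (fun x => x) with
    | none => simp
    | some v =>
      have hv := PySem.List.max?_mem hmx
      rw [List.mem_map] at hv
      obtain ⟨w', _, hw'⟩ := hv
      simp only [Option.getD_some]
      rw [← hw', PySem.Str.len_eq]
      positivity
  apply PySem.List.foldl_congr_mem
  intro result w hwmem
  apply pvStep_eq word _ hM0 w _ result
  have : PySem.Str.len w ∈ word_list.map PySem.Str.len := List.mem_map_of_mem hwmem
  have hle := PySem.List.le_maxD_id (word_list.map PySem.Str.len) 0 _ this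
  rw [PySem.Str.len_eq] at hle
  exact hle
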